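-- pv_equiv track=rewrite | github.com/opencosmos/datacosmos-sdk | datacosmos/stac/validation/license.py | _tokenize_spdx
-- ===== SOURCE A (Python) =====
-- def _tokenize_spdx(value: str) -> list[str]:
--     """Tokenize an SPDX expression into individual tokens.
--
--     Args:
--         value: The SPDX expression string.
--
--     Returns:
--         List of tokens.
--     """
--     tokens = []
--     i = 0
--
--     while i < len(value):
--         ch = value[i]
--
--         # Skip whitespace
--         if ch in " \t\n\r":
--             i += 1
--             continue
--
--         # Parentheses and + are single-character tokens
--         if ch == "(":
--             tokens.append("(")
--             i += 1
--             continue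
--
--         if ch == ")":
--             tokens.append(")")
--             i += 1
--             continue
--
--         if ch == "+":
--             tokens.append("+")
--             i += 1
--             continue
--
--         # Read identifier/keyword
--         start = i
--         while i < len(value):
--             ch = value[i]
--             if ch in " \t\n\r()+":
--                 break
--             i += 1
--
--         token = value[start:i]
--         tokens.append(token)
--
--     return tokens
-- ===== SOURCE B (Python) =====
-- import re
--
-- _SPDX_TOKEN_RE = re.compile(r'[()+]|[^ \t\n\r()+]+')
--
-- def _tokenize_spdx(value: str) -> list[str]:
--     """Tokenize an SPDX expression into individual tokens (single regex scan)."""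
--     return _SPDX_TOKEN_RE.findall(value)
-- ===== Notes on version B (the rewrite author's own statement) =====
-- stated objective: idiomatic
-- what changed: Replaces the manual index-driven scanner with its inner word loop by a single precompiled regex findall whose two alternatives match a lone paren/plus or a maximal run of non-separator characters.
import Mathlib
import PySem

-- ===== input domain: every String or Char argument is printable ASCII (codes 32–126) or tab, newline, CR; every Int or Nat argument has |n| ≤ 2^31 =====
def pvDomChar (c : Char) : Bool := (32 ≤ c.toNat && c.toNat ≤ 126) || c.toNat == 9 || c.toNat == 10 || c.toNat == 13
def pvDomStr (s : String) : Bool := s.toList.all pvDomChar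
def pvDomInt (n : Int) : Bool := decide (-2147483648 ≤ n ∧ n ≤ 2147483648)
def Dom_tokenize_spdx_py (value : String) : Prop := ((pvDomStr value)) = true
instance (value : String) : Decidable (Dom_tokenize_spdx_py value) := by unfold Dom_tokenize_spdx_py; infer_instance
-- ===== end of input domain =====

-- B replaces A's hand-written index scanner (outer while + inner word loop) by a single
-- regex-findall pass; same O(n) cost, more idiomatic.

-- ===== PORT A =====
-- A's whitespace test 'ch in " \t\n\r"'
def tokAisWS (c : Char) : Bool := c == ' ' || c == '\t' || c == '\n' || c == '\r'
-- A's inner-loop break test 'ch in " \t\n\r()+"'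
def tokAisSep (c : Char) : Bool := tokAisWS c || c == '(' || c == ')' || c == '+'

-- A's inner while loop: scan forward until a separator; returns (chars of value[start:i], rest)
def tokAword : List Char → List Char × List Char
  | [] => ([], [])
  | c :: cs =>
    if tokAisSep c then ([], c :: cs)
    else
      let p := tokAword cs
      (c :: p.1, p.2)

theorem tokAword_len (cs : List Char) : (tokAword cs).2.length ≤ cs.length := by
  induction cs with
  | nil => simp [tokAword]
  | cons c cs ih =>
    simp only [tokAword]
    split
    · simp
    · simpa using Nat.le_succ_of_le ih

-- A's outer while loop, index i replaced by the remaining suffix of the character list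
def tokA : List Char → List String
  | [] => []
  | c :: cs =>
    if tokAisWS c then tokA cs
    else if c == '(' then "(" :: tokA cs
    else if c == ')' then ")" :: tokA cs
    else if c == '+' then "+" :: tokA cs
    else String.ofList (c :: (tokAword cs).1) :: tokA (tokAword cs).2
termination_by l => l.length
decreasing_by
  all_goals simp
  exact tokAword_len cs

def tokenize_spdx_py (value : String) : List String := tokA value.toList

-- ===== PORT B =====
-- Source B is re.findall(r'[()+]|[^ \t\n\r()+]+', value); Lean has no regex engine, so this is
-- the exact hand realization of that scan: one left-to-right pass in which '(' ')' '+' each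
-- match alone, a maximal run of non-separator characters matches as one token, and
-- whitespace matches nothing.
def tokBflush (acc : List String) (cur : List Char) : List String :=
  if cur.isEmpty then acc else acc ++ [String.ofList cur.reverse]

def tokBstep (st : List String × List Char) (c : Char) : List String × List Char :=
  if c == ' ' || c == '\t' || c == '\n' || c == '\r' then (tokBflush st.1 st.2, [])
  else if c == '(' || c == ')' || c == '+' then (tokBflush st.1 st.2 ++ [String.ofList [c]], [])
  else (st.1, c :: st.2)

def tokenize_spdx_py_alt (value : String) : List String :=
  let st := value.toList.foldl tokBstep ([], [])
  tokBflush st.1 st.2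

-- ===== PRECONDITION & SPEC =====
def Spec_tokenize_spdx_py (value : String) (out : List String) : Prop := out = tokenize_spdx_py_alt value
instance (value : String) (out : List String) : Decidable (Spec_tokenize_spdx_py value out) := by unfold Spec_tokenize_spdx_py; infer_instance

-- ===== CLAIM (what is proved, stated in full; the proofs are below) =====
def Claim_equal_tokenize_spdx_py : Prop := ∀ (value : String), Dom_tokenize_spdx_py value → Spec_tokenize_spdx_py value (tokenize_spdx_py value)

-- ===== LEMMAS AND PROOFS =====

-- equation lemmas for the well-founded tokA
theorem tokA_nil : tokA [] = [] := by rw [tokA]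
theorem tokA_cons (c : Char) (cs : List Char) : tokA (c :: cs) =
    (if tokAisWS c then tokA cs
     else if c == '(' then "(" :: tokA cs
     else if c == ')' then ")" :: tokA cs
     else if c == '+' then "+" :: tokA cs
     else String.ofList (c :: (tokAword cs).1) :: tokA (tokAword cs).2) := by rw [tokA]

-- run B's scan from an arbitrary state
def runB (cs : List Char) (acc : List String) (cur : List Char) : List String :=
  let st := cs.foldl tokBstep (acc, cur)
  tokBflush st.1 st.2

theorem runB_nil (acc : List String) (cur : List Char) : runB [] acc cur = tokBflush acc cur := rfl

theorem runB_ws (c : Char) (cs : List Char) (acc : List String) (cur : List Char)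
    (h : (c == ' ' || c == '\t' || c == '\n' || c == '\r') = true) :
    runB (c :: cs) acc cur = runB cs (tokBflush acc cur) [] := by
  simp [runB, tokBstep, h]

theorem runB_par (c : Char) (cs : List Char) (acc : List String) (cur : List Char)
    (hw : ¬ (c == ' ' || c == '\t' || c == '\n' || c == '\r') = true)
    (hp : (c == '(' || c == ')' || c == '+') = true) :
    runB (c :: cs) acc cur = runB cs (tokBflush acc cur ++ [String.ofList [c]]) [] := by
  simp [runB, tokBstep, hw, hp]

theorem runB_other (c : Char) (cs : List Char) (acc : List String) (cur : List Char)
    (hw : ¬ (c == ' ' || c == '\t' || c == '\n' || c == '\r') = true)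
    (hp : ¬ (c == '(' || c == ')' || c == '+') = true) :
    runB (c :: cs) acc cur = runB cs acc (c :: cur) := by
  simp [runB, tokBstep, hw, hp]

theorem tokBflush_append (a acc : List String) (cur : List Char) :
    tokBflush (a ++ acc) cur = a ++ tokBflush acc cur := by
  unfold tokBflush; split <;> simp

theorem runB_acc (cs : List Char) (a acc : List String) (cur : List Char) :
    runB cs (a ++ acc) cur = a ++ runB cs acc cur := by
  induction cs generalizing acc cur with
  | nil => simpa [runB] using tokBflush_append a acc cur
  | cons c cs ih =>
    by_cases hw : (c == ' ' || c == '\t' || c == '\n' || c == '\r') = true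
    · rw [runB_ws c cs _ cur hw, runB_ws c cs acc cur hw, tokBflush_append]
      exact ih (tokBflush acc cur) []
    · by_cases hp : (c == '(' || c == ')' || c == '+') = true
      · rw [runB_par c cs _ cur hw hp, runB_par c cs acc cur hw hp, tokBflush_append,
          List.append_assoc]
        exact ih (tokBflush acc cur ++ [String.ofList [c]]) []
      · rw [runB_other c cs _ cur hw hp, runB_other c cs acc cur hw hp]
        exact ih acc (c :: cur)

theorem runB_acc0 (cs : List Char) (a : List String) : runB cs a [] = a ++ runB cs [] [] := by
  simpa using runB_acc cs a [] []

-- the pieces of A's separator test, Bool-level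
theorem sep_split (c : Char) (h : ¬ tokAisSep c = true) :
    ¬ (c == ' ' || c == '\t' || c == '\n' || c == '\r') = true ∧
    ¬ (c == '(' || c == ')' || c == '+') = true := by
  simp only [tokAisSep, tokAisWS, Bool.or_eq_true] at h ⊢
  constructor <;> intro hc <;> apply h <;> tauto

-- B's scan while inside a word: it consumes exactly the characters A's inner loop consumes
theorem runB_word (cs : List Char) (cur : List Char) :
    runB cs [] cur = runB (tokAword cs).2 [] ((tokAword cs).1.reverse ++ cur) := by
  induction cs generalizing cur with
  | nil => simp [tokAword]
  | cons c cs ih =>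
    by_cases h : tokAisSep c = true
    · simp [tokAword, h]
    · obtain ⟨hw, hp⟩ := sep_split c h
      rw [runB_other c cs [] cur hw hp, ih (c :: cur)]
      simp [tokAword, h]

-- the rest after A's inner word loop starts with a separator (or is empty)
theorem tokAword_rest (cs : List Char) :
    ∀ c' r', (tokAword cs).2 = c' :: r' → tokAisSep c' = true := by
  induction cs with
  | nil => intro c' r' h; simp [tokAword] at h
  | cons c cs ih =>
    intro c' r' h
    simp only [tokAword] at h
    split at h
    · rename_i hs
      injection h with h1 _
      subst h1
      exact hs
    · exact ih c' r' h

theorem tokA_eq_runB : ∀ n cs, cs.length ≤ n → tokA cs = runB cs [] [] := by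
  intro n
  induction n with
  | zero =>
    intro cs h
    have : cs = [] := List.eq_nil_of_length_eq_zero (Nat.le_zero.mp h)
    subst this
    simp [tokA_nil, runB_nil, tokBflush]
  | succ n ih =>
    intro cs hlen
    match cs with
    | [] => simp [tokA_nil, runB_nil, tokBflush]
    | c :: cs =>
      have hcs : cs.length ≤ n := Nat.le_of_succ_le_succ hlen
      by_cases hws : tokAisWS c = true
      · have hws' : (c == ' ' || c == '\t' || c == '\n' || c == '\r') = true := hws
        rw [tokA_cons, if_pos hws, runB_ws c cs [] [] hws']
        simpa [tokBflush] using ih cs hcs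
      · have hws' : ¬ (c == ' ' || c == '\t' || c == '\n' || c == '\r') = true := hws
        by_cases hpar : (c == '(' || c == ')' || c == '+') = true
        · rw [runB_par c cs [] [] hws' hpar]
          have hfl : tokBflush [] [] ++ [String.ofList [c]] = [String.ofList [c]] := by
            simp [tokBflush]
          rw [hfl, runB_acc0 cs [String.ofList [c]], ← ih cs hcs, tokA_cons, if_neg hws]
          rcases (by simpa using hpar : (c = '(' ∨ c = ')') ∨ c = '+') with (h | h) | h <;>
            subst h <;> rfl
        · -- word case
          have hsep : ¬ tokAisSep c = true := by
            simp only [tokAisSep, tokAisWS, Bool.or_eq_true] at hws' hpar ⊢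
            tauto
          have h1 : ¬ (c == '(') = true := fun h => hpar (by simp_all)
          have h2 : ¬ (c == ')') = true := fun h => hpar (by simp_all)
          have h3 : ¬ (c == '+') = true := fun h => hpar (by simp_all)
          rw [tokA_cons, if_neg hws, if_neg h1, if_neg h2, if_neg h3,
            runB_other c cs [] [] hws' hpar, runB_word cs [c]]
          have hrev : ((tokAword cs).1.reverse ++ [c]).reverse = c :: (tokAword cs).1 := by
            simp
          have hne : ((tokAword cs).1.reverse ++ [c]).isEmpty = false := by
            simp
          have hrlen : (tokAword cs).2.length ≤ n := Nat.le_trans (tokAword_len cs) hcs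
          match hr : (tokAword cs).2, hrlen with
          | [], _ =>
            rw [tokA_nil, runB_nil]
            simp [tokBflush, hne, hrev]
          | c' :: r', hrlen' =>
            have hsep' : tokAisSep c' = true := tokAword_rest cs c' r' hr
            have hr'len : r'.length ≤ n := Nat.le_of_succ_le hrlen'
            have hfl : tokBflush [] ((tokAword cs).1.reverse ++ [c]) =
                [String.ofList (c :: (tokAword cs).1)] := by
              simp [tokBflush, hne, hrev]
            by_cases hw2 : tokAisWS c' = true
            · have hw2' : (c' == ' ' || c' == '\t' || c' == '\n' || c' == '\r') = true := hw2
              rw [runB_ws c' r' [] _ hw2', hfl, runB_acc0 r' _, ← ih r' hr'len,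
                tokA_cons, if_pos hw2]
              rfl
            · have hp2 : (c' == '(' || c' == ')' || c' == '+') = true := by
                simp only [tokAisSep, hw2, Bool.false_or] at hsep'
                simpa using hsep'
              have hw2' : ¬ (c' == ' ' || c' == '\t' || c' == '\n' || c' == '\r') = true := hw2
              rw [runB_par c' r' [] _ hw2' hp2, hfl, runB_acc0 r' _, ← ih r' hr'len,
                tokA_cons, if_neg hw2]
              rcases (by simpa using hp2 : (c' = '(' ∨ c' = ')') ∨ c' = '+') with (h | h) | h <;>
                subst h <;> rfl

-- ===== VERDICT (by name: the statement is the Claim_ definition above) =====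
theorem tokenize_spdx_py_spec : Claim_equal_tokenize_spdx_py := by
  intro value _
  show tokA value.toList = tokenize_spdx_py_alt value
  exact tokA_eq_runB value.toList.length value.toList le_rfl
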